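-- pv_equiv track=rewrite | github.com/SuryaTalla22/Certified-Golden-Maximality-for-Invariant-Circle-Thresholds-in-Conservative-Twist-Maps | code_repository/kam_theorem_suite/hyperbolicity_certifier.py | _longest_suffix_subset
-- ===== SOURCE A (Python) =====
-- from typing import Any, Iterable, Sequence
--
-- def _longest_suffix_subset(generated_qs: Sequence[int], witness_qs: set[int]) -> list[int]:
--     ordered = sorted({int(q) for q in generated_qs})
--     if not ordered:
--         return []
--     for idx in range(len(ordered)):
--         tail = ordered[idx:]
--         if tail and all(q in witness_qs for q in tail):
--             return tail
--     return []
-- ===== SOURCE B (Python) =====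
-- def _longest_suffix_subset(generated_qs, witness_qs):
--     ordered = sorted({int(q) for q in generated_qs})
--     bad = [q for q in ordered if q not in witness_qs]
--     if not bad:
--         return ordered
--     threshold = max(bad)
--     return [q for q in ordered if q > threshold]
-- ===== Notes on version B (the rewrite author's own statement) =====
-- stated objective: alternative
-- what changed: Instead of scanning each suffix with a per-element membership test, B collects the non-witness values once, takes their maximum as a threshold, and returns the sorted-unique elements above it in one comparison pass.
import Mathlib
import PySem

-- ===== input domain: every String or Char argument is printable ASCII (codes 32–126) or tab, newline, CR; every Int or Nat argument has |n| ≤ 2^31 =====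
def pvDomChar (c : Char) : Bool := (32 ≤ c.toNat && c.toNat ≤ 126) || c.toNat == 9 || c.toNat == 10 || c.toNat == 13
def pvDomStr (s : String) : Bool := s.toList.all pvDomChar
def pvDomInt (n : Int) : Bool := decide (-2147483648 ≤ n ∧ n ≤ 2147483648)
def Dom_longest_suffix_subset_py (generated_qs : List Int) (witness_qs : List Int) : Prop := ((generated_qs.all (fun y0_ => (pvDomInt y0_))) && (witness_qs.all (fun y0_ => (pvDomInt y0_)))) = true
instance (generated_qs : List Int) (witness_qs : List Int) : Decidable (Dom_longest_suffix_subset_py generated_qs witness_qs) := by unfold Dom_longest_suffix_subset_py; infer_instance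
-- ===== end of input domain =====

-- B replaces A's suffix-by-suffix scan by one pass: the maximum of the non-witness values
-- becomes a threshold, and the result is the elements above it; equivalence on all inputs.

-- ===== PORT A =====
-- A's loop 'for idx in range(len(ordered)): tail = ordered[idx:] …' visits exactly the
-- suffixes of ordered in order, so it is transcribed as structural recursion over suffixes.
def lssLoopA (witness_qs : List Int) : List Int → List Int
  | [] => []
  | x :: xs =>
    if (x :: xs).all (fun q => witness_qs.contains q) then x :: xs
    else lssLoopA witness_qs xs

def longest_suffix_subset_py (generated_qs : List Int) (witness_qs : List Int) : List Int :=
  let ordered := PySem.List.sorted (PySem.Set.ofList generated_qs) (fun x => x) false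
  if ordered = [] then []
  else lssLoopA witness_qs ordered

-- ===== PORT B =====
def longest_suffix_subset_py_alt (generated_qs : List Int) (witness_qs : List Int) : List Int :=
  let ordered := PySem.List.sorted (PySem.Set.ofList generated_qs) (fun x => x) false
  let bad := ordered.filter (fun q => !(witness_qs.contains q))
  if bad = [] then ordered
  else
    match PySem.List.max? bad (fun x => x) with   -- max(bad); bad is nonempty here
    | some threshold => ordered.filter (fun q => decide (threshold < q))
    | none => []

-- ===== PRECONDITION & SPEC =====
def Spec_longest_suffix_subset_py (generated_qs : List Int) (witness_qs : List Int) (out : List Int) : Prop := out = longest_suffix_subset_py_alt generated_qs witness_qs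
instance (generated_qs : List Int) (witness_qs : List Int) (out : List Int) : Decidable (Spec_longest_suffix_subset_py generated_qs witness_qs out) := by unfold Spec_longest_suffix_subset_py; infer_instance

-- ===== CLAIM (what is proved, stated in full; the proofs are below) =====
def Claim_equal_longest_suffix_subset_py : Prop := ∀ (generated_qs : List Int) (witness_qs : List Int), Dom_longest_suffix_subset_py generated_qs witness_qs → Spec_longest_suffix_subset_py generated_qs witness_qs (longest_suffix_subset_py generated_qs witness_qs)

-- ===== LEMMAS AND PROOFS =====

-- B's body as a function of the already-sorted list, for the induction.
def altBody (witness_qs l : List Int) : List Int :=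
  if l.filter (fun q => !(witness_qs.contains q)) = [] then l
  else
    match PySem.List.max? (l.filter (fun q => !(witness_qs.contains q))) (fun x => x) with
    | some threshold => l.filter (fun q => decide (threshold < q))
    | none => []

lemma alt_eq_altBody (generated_qs witness_qs : List Int) :
    longest_suffix_subset_py_alt generated_qs witness_qs
      = altBody witness_qs (PySem.List.sorted (PySem.Set.ofList generated_qs) (fun x => x) false) := rfl

lemma lssLoopA_eq_altBody (w : List Int) :
    ∀ l : List Int, l.Pairwise (· < ·) → lssLoopA w l = altBody w l := by
  intro l
  induction l with
  | nil => intro _; rfl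
  | cons x xs ih =>
    intro hp
    obtain ⟨hx, hxs⟩ := List.pairwise_cons.mp hp
    by_cases hall : (x :: xs).all (fun q => w.contains q) = true
    · -- every element is a witness: A keeps the whole list, B finds no bad element
      have hbad : (x :: xs).filter (fun q => !(w.contains q)) = [] := by
        rw [List.filter_eq_nil_iff]
        intro a ha
        have hc := List.all_eq_true.mp hall a ha
        simp only [Bool.not_eq_true']
        simpa using hc
      have hA : lssLoopA w (x :: xs) = x :: xs := by
        simp only [lssLoopA, if_pos hall]
      have hB : altBody w (x :: xs) = x :: xs := by
        unfold altBody; rw [if_pos hbad]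
      rw [hA, hB]
    · have hstep : lssLoopA w (x :: xs) = lssLoopA w xs := by
        simp only [lssLoopA, if_neg hall]
      rw [hstep, ih hxs]
      -- it remains to show altBody w xs = altBody w (x :: xs)
      have hbadne : (x :: xs).filter (fun q => !(w.contains q)) ≠ [] := by
        rw [Ne, List.filter_eq_nil_iff]
        intro hnone
        apply hall
        rw [List.all_eq_true]
        intro a ha
        have := hnone a ha
        simpa using this
      by_cases hbx : xs.filter (fun q => !(w.contains q)) = []
      · -- the tail is all witnesses, so x itself is the (only) bad element
        have hpx : (!(w.contains x)) = true := by
          by_contra hpx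
          apply hbadne
          rw [List.filter_cons, if_neg hpx, hbx]
        have hbadeq : (x :: xs).filter (fun q => !(w.contains q)) = [x] := by
          rw [List.filter_cons, if_pos hpx, hbx]
        have hmax : PySem.List.max? ((x :: xs).filter (fun q => !(w.contains q))) (fun x => x) = some x := by
          rw [hbadeq]; rfl
        have hfil : (x :: xs).filter (fun q => decide (x < q)) = xs := by
          have h1 : (x :: xs).filter (fun q => decide (x < q))
              = xs.filter (fun q => decide (x < q)) := by
            simp
          rw [h1]
          exact List.filter_eq_self.mpr (fun a ha => by simpa using hx a ha)
        unfold altBody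
        rw [if_pos hbx, if_neg hbadne, hmax]
        show xs = List.filter (fun q => decide (x < q)) (x :: xs)
        exact hfil.symm
      · -- the tail already has bad elements; the two maxima agree
        obtain ⟨b, bs, hbe⟩ := List.exists_cons_of_ne_nil hbx
        have hs : PySem.List.max? (xs.filter (fun q => !(w.contains q))) (fun x => x)
            = some (bs.foldl max b) := by
          rw [hbe, PySem.List.max?_id_cons]
        set s := bs.foldl max b with hsdef
        obtain ⟨c, cs, hce⟩ := List.exists_cons_of_ne_nil hbadne
        have ht : PySem.List.max? ((x :: xs).filter (fun q => !(w.contains q))) (fun x => x)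
            = some (cs.foldl max c) := by
          rw [hce, PySem.List.max?_id_cons]
        set t := cs.foldl max c with htdef
        have hsmem : s ∈ xs.filter (fun q => !(w.contains q)) := PySem.List.max?_mem hs
        have hsmax : ∀ y ∈ xs.filter (fun q => !(w.contains q)), y ≤ s := by
          have := PySem.List.max?_isMax hs
          simpa using this
        have htmem : t ∈ (x :: xs).filter (fun q => !(w.contains q)) := PySem.List.max?_mem ht
        have htmax : ∀ y ∈ (x :: xs).filter (fun q => !(w.contains q)), y ≤ t := by
          have := PySem.List.max?_isMax ht
          simpa using this
        have hxs' : x < s := hx s (List.mem_filter.mp hsmem).1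
        have hsbad : s ∈ (x :: xs).filter (fun q => !(w.contains q)) := by
          rw [List.filter_cons]
          split
          · exact List.mem_cons_of_mem _ hsmem
          · exact hsmem
        have hst : s ≤ t := htmax s hsbad
        have hts : t = s := by
          rcases List.mem_filter.mp htmem with ⟨htmem', htp⟩
          rcases List.mem_cons.mp htmem' with h | h
          · exact absurd (h ▸ hst) (not_le.mpr hxs')
          · exact le_antisymm (hsmax t (List.mem_filter.mpr ⟨h, htp⟩)) hst
        have hfil : (x :: xs).filter (fun q => decide (t < q))
            = xs.filter (fun q => decide (s < q)) := by
          rw [List.filter_cons, hts]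
          have hdx : (decide (s < x)) = false := by
            simp [not_lt.mpr (le_of_lt hxs')]
          simp [hdx]
        unfold altBody
        rw [if_neg hbx, if_neg hbadne, hs, ht]
        show List.filter (fun q => decide (s < q)) xs
            = List.filter (fun q => decide (t < q)) (x :: xs)
        exact hfil.symm

-- ===== VERDICT (by name: the statement is the Claim_ definition above) =====
theorem longest_suffix_subset_py_spec : Claim_equal_longest_suffix_subset_py := by
  intro generated_qs witness_qs _
  unfold Spec_longest_suffix_subset_py
  rw [alt_eq_altBody]
  show (if PySem.List.sorted (PySem.Set.ofList generated_qs) (fun x => x) false = [] then []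
        else lssLoopA witness_qs (PySem.List.sorted (PySem.Set.ofList generated_qs) (fun x => x) false))
      = _
  by_cases h0 : PySem.List.sorted (PySem.Set.ofList generated_qs) (fun x => x) false = []
  · rw [if_pos h0, h0]; rfl
  · rw [if_neg h0]
    exact lssLoopA_eq_altBody witness_qs _ (PySem.List.sorted_ofList_pairwise_lt generated_qs)
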